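-- pv_equiv track=rewrite | github.com/sadeddo/Quest-Codewars | Step8/main.py | millier
-- ===== SOURCE A (Python) =====
-- def millier(b,rom,str1):
--     a = int(str1[b])
--     if a < 4:
--         i = 0
--         while i < a:
--             rom += "M"
--             i += 1
--     elif a == 4:
--         rom += "M(V)"
--     elif 9 > a > 4:
--         rom += "(V)"+ ("M" * (a - 5))
--     elif a == 9:
--         rom += "M(X)"
--     return rom
-- ===== SOURCE B (Python) =====
-- TABLE = ["", "M", "MM", "MMM", "M(V)", "(V)", "(V)M", "(V)MM", "(V)MMM", "M(X)"]
--
-- def millier(b, rom, str1):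
--     a = int(str1[b])
--     return rom + TABLE[a]
-- ===== Notes on version B (the rewrite author's own statement) =====
-- stated objective: simpler
-- what changed: Replaced the branch cascade and the while loop that appends "M" one at a time with a single lookup in a static 10-entry table indexed by the digit.
import Mathlib
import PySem

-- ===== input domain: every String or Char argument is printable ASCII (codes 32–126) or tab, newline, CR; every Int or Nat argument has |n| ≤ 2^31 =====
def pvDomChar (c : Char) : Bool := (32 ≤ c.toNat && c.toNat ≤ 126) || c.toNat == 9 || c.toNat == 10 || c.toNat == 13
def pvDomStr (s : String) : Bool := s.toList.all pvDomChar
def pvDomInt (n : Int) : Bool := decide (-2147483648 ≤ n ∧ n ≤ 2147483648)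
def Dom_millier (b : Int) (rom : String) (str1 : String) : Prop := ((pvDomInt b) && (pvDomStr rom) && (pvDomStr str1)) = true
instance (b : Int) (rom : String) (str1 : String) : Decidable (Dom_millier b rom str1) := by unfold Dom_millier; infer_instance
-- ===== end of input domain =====

-- B replaces A's branch cascade and M-appending while loop with a single static table lookup (objective: simpler).


-- ===== PORT A =====
-- the `while i < a: rom += "M"; i += 1` loop, step for step
def millierLoop (a i : Int) (rom : String) : String :=
  if _h : i < a then millierLoop a (i + 1) (rom ++ "M") else rom
termination_by (a - i).toNat
decreasing_by omega

def millier (b : Int) (rom : String) (str1 : String) : String :=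
  match PySem.Str.pyGet? str1 b with
  | none => ""            -- IndexError: excluded by Pre_millier
  | some c =>
    match PySem.Int.ofStr? (String.mk [c]) with
    | none => ""          -- ValueError: excluded by Pre_millier
    | some a =>
      if a < 4 then millierLoop a 0 rom
      else if a = 4 then rom ++ "M(V)"
      else if 9 > a ∧ a > 4 then rom ++ "(V)" ++ String.mk (List.replicate (a - 5).toNat 'M')
      else if a = 9 then rom ++ "M(X)"
      else rom

-- ===== PORT B =====
def millierTable : List String :=
  ["", "M", "MM", "MMM", "M(V)", "(V)", "(V)M", "(V)MM", "(V)MMM", "M(X)"]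

def millier_alt (b : Int) (rom : String) (str1 : String) : String :=
  match PySem.Str.pyGet? str1 b with
  | none => ""
  | some c =>
    match PySem.Int.ofStr? (String.mk [c]) with
    | none => ""
    | some a =>
      match PySem.List.pyGet? millierTable a with
      | none => ""
      | some t => rom ++ t

-- ===== PRECONDITION & SPEC =====
-- Pre_ excludes exactly the inputs where A raises: b out of range (IndexError) or str1[b] not a digit (ValueError).
def Pre_millier (b : Int) (rom : String) (str1 : String) : Prop :=
  ((PySem.Str.pyGet? str1 b).map Char.isDigit).getD false = true
instance (b : Int) (rom : String) (str1 : String) : Decidable (Pre_millier b rom str1) := by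
  unfold Pre_millier; infer_instance

def pvWitness_millier : Int × String × String := (1, "abc", "1984")

def Spec_millier (b : Int) (rom : String) (str1 : String) (out : String) : Prop := out = millier_alt b rom str1
instance (b : Int) (rom : String) (str1 : String) (out : String) : Decidable (Spec_millier b rom str1 out) := by unfold Spec_millier; infer_instance

-- ===== CLAIM (what is proved, stated in full; the proofs are below) =====
def Claim_equal_millier : Prop := ∀ (b : Int) (rom : String) (str1 : String), Dom_millier b rom str1 → Pre_millier b rom str1 → Spec_millier b rom str1 (millier b rom str1)

-- ===== LEMMAS AND PROOFS =====

lemma digit_cases (c : Char) (h : c.isDigit = true) :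
    c = '0' ∨ c = '1' ∨ c = '2' ∨ c = '3' ∨ c = '4' ∨ c = '5' ∨ c = '6' ∨ c = '7' ∨ c = '8' ∨ c = '9' := by
  have h1 : ('0' : Char) ≤ c ∧ c ≤ '9' := by simpa [Char.isDigit] using h
  have hb : 48 ≤ c.toNat ∧ c.toNat ≤ 57 :=
    ⟨UInt32.le_iff_toNat_le.mp h1.1, UInt32.le_iff_toNat_le.mp h1.2⟩
  have hv : c.toNat = 48 ∨ c.toNat = 49 ∨ c.toNat = 50 ∨ c.toNat = 51 ∨
      c.toNat = 52 ∨ c.toNat = 53 ∨ c.toNat = 54 ∨ c.toNat = 55 ∨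
      c.toNat = 56 ∨ c.toNat = 57 := by omega
  have key : ∀ d : Char, c.toNat = d.toNat → c = d := by
    intro d hd
    exact Char.ext (UInt32.toNat_inj.mp hd)
  rcases hv with h | h | h | h | h | h | h | h | h | h
  · exact Or.inl (key '0' h)
  · exact Or.inr <| Or.inl (key '1' h)
  · exact Or.inr <| Or.inr <| Or.inl (key '2' h)
  · exact Or.inr <| Or.inr <| Or.inr <| Or.inl (key '3' h)
  · exact Or.inr <| Or.inr <| Or.inr <| Or.inr <| Or.inl (key '4' h)
  · exact Or.inr <| Or.inr <| Or.inr <| Or.inr <| Or.inr <| Or.inl (key '5' h)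
  · exact Or.inr <| Or.inr <| Or.inr <| Or.inr <| Or.inr <| Or.inr <| Or.inl (key '6' h)
  · exact Or.inr <| Or.inr <| Or.inr <| Or.inr <| Or.inr <| Or.inr <| Or.inr <| Or.inl (key '7' h)
  · exact Or.inr <| Or.inr <| Or.inr <| Or.inr <| Or.inr <| Or.inr <| Or.inr <| Or.inr <| Or.inl (key '8' h)
  · exact Or.inr <| Or.inr <| Or.inr <| Or.inr <| Or.inr <| Or.inr <| Or.inr <| Or.inr <| Or.inr (key '9' h)

lemma loop_step (a i : Int) (rom : String) (h : i < a) :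
    millierLoop a i rom = millierLoop a (i + 1) (rom ++ "M") := by
  rw [millierLoop]; simp [h]

lemma loop_done (a i : Int) (rom : String) (h : ¬ i < a) :
    millierLoop a i rom = rom := by
  rw [millierLoop]; simp [h]

lemma branches_eq_table (a : Int) (rom : String) (h0 : 0 ≤ a) (h9 : a ≤ 9) :
    (if a < 4 then millierLoop a 0 rom
     else if a = 4 then rom ++ "M(V)"
     else if 9 > a ∧ a > 4 then rom ++ "(V)" ++ String.mk (List.replicate (a - 5).toNat 'M')
     else if a = 9 then rom ++ "M(X)"
     else rom)
    = match PySem.List.pyGet? millierTable a with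
      | none => ""
      | some t => rom ++ t := by
  interval_cases a <;>
    simp [loop_step, loop_done, millierTable, PySem.List.pyGet?, PySem.List.pyIdx?,
      String.append_assoc, List.replicate]
  all_goals rfl

-- ===== VERDICT (by name: the statement is the Claim_ definition above) =====
theorem millier_spec : Claim_equal_millier := by
  intro b rom str1 _ hpre
  unfold Spec_millier millier millier_alt
  unfold Pre_millier at hpre
  simp only [PySem.Str.pyGet?_eq, PySem.Chars.pyGet?_eq_listPyGet?] at hpre ⊢
  cases hg : PySem.List.pyGet? str1.toList b with
  | none => rw [hg] at hpre
  | some c =>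
    rw [hg] at hpre
    simp only [Option.map_some, Option.getD_some] at hpre
    rcases digit_cases c hpre with h | h | h | h | h | h | h | h | h | h <;> subst h
    · exact branches_eq_table 0 rom (by norm_num) (by norm_num)
    · exact branches_eq_table 1 rom (by norm_num) (by norm_num)
    · exact branches_eq_table 2 rom (by norm_num) (by norm_num)
    · exact branches_eq_table 3 rom (by norm_num) (by norm_num)
    · exact branches_eq_table 4 rom (by norm_num) (by norm_num)
    · exact branches_eq_table 5 rom (by norm_num) (by norm_num)
    · exact branches_eq_table 6 rom (by norm_num) (by norm_num)
    · exact branches_eq_table 7 rom (by norm_num) (by norm_num)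
    · exact branches_eq_table 8 rom (by norm_num) (by norm_num)
    · exact branches_eq_table 9 rom (by norm_num) (by norm_num)
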